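-- pv_equiv track=rewrite | github.com/amdoli/ahmeds-package | ahmedsPackage/AhmedsRead_Writef.py | counting_words
-- ===== SOURCE A (Python) =====
-- def counting_words(paragraph):
--     freq={}
--     for word in paragraph.split():
--         if word not in freq.keys():
--             freq[word]=0
--         freq[word]+=1
--     most_freq=0
--     for words in freq:
--         if most_freq < freq.get(words):
--             most_freq = freq.get(words)
--     return most_freq
-- ===== SOURCE B (Python) =====
-- def counting_words(paragraph):
--     words = sorted(paragraph.split())
--     best = 0
--     run = 0
--     prev = None
--     for w in words:
--         run = run + 1 if w == prev else 1
--         prev = w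
--         if run > best:
--             best = run
--     return best
-- ===== Notes on version B (the rewrite author's own statement) =====
-- stated objective: alternative
-- what changed: Sort-then-scan instead of hashing: B sorts the word list so equal words are adjacent, then finds the longest run in one scan, building no frequency dict at all.
import Mathlib
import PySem

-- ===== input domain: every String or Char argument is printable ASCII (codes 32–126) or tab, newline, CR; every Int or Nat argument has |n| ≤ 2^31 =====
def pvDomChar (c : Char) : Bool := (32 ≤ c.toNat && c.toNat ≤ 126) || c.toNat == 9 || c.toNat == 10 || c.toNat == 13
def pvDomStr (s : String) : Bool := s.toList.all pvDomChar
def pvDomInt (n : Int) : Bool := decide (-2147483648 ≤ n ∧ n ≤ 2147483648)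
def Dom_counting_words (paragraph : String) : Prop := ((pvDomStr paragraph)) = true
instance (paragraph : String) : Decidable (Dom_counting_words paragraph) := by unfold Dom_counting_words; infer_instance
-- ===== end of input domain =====

-- B replaces the dict-based counter with sort-then-scan: sort the words so equal
-- words are adjacent, then one scan for the longest run; same return value (objective: alternative).

-- ===== PORT A =====
-- first loop: build freq; 'freq[word]+=1' = insert word (freq[word] + 1); the key is present, so getD reads freq[word]
def counting_words (paragraph : String) : Int :=
  let freq := (PySem.Str.split₀ paragraph).foldl
    (fun d word =>
      let d1 := if d.contains word then d else d.insert word 0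
      d1.insert word (d1.getD word 0 + 1))
    PySem.Dict.empty
  -- second loop: 'for words in freq' iterates keys; freq.get(words) is some value (key present), read via (get? k).getD 0
  freq.keys.foldl
    (fun most_freq k =>
      let v := (freq.get? k).getD 0
      if most_freq < v then v else most_freq)
    0

-- ===== PORT B =====
-- sorted(paragraph.split()), then one scan with state (best, run, prev); 'w == prev' with prev None is False
def counting_words_alt (paragraph : String) : Int :=
  let words := PySem.List.sorted (PySem.Str.split₀ paragraph) (fun w => w) false
  (words.foldl
    (fun (s : Int × Int × Option String) w =>
      let run := if some w = s.2.2 then s.2.1 + 1 else 1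
      (if run > s.1 then run else s.1, run, some w))
    (0, 0, none)).1

-- ===== PRECONDITION & SPEC =====
def Spec_counting_words (paragraph : String) (out : Int) : Prop := out = counting_words_alt paragraph
instance (paragraph : String) (out : Int) : Decidable (Spec_counting_words paragraph out) := by unfold Spec_counting_words; infer_instance

-- ===== CLAIM (what is proved, stated in full; the proofs are below) =====
def Claim_equal_counting_words : Prop := ∀ (paragraph : String), Dom_counting_words paragraph → Spec_counting_words paragraph (counting_words paragraph)

-- ===== LEMMAS AND PROOFS =====

-- the maximum count of any distinct word of l (0 for empty l): the value both programs compute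
def pvMx (l : List String) : Int :=
  (PySem.Set.ofList l).foldl (fun m k => max m (l.count k : Int)) 0

theorem pvMx_spec (l : List String) :
    (0 ≤ pvMx l ∧ ∀ k ∈ l, (l.count k : Int) ≤ pvMx l) ∧
    (pvMx l = 0 ∨ ∃ k ∈ l, pvMx l = (l.count k : Int)) := by
  have hfold : pvMx l
      = ((PySem.Set.ofList l).map (fun k => (l.count k : Int))).foldl max 0 := by
    unfold pvMx; rw [List.foldl_map]
  constructor
  · constructor
    · rw [hfold]; exact (PySem.List.le_foldl_max _ 0).1
    · intro k hk
      rw [hfold]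
      exact (PySem.List.le_foldl_max _ 0).2 _
        (List.mem_map_of_mem ((PySem.Set.mem_ofList l k).2 hk))
  · rw [hfold]
    rcases PySem.List.foldl_max_mem ((PySem.Set.ofList l).map (fun k => (l.count k : Int))) 0 with h | h
    · exact Or.inl h
    · rcases List.mem_map.1 h with ⟨k, hk, hv⟩
      exact Or.inr ⟨k, (PySem.Set.mem_ofList l k).1 hk, hv.symm⟩

theorem pvMx_nonneg (l : List String) : 0 ≤ pvMx l := ((pvMx_spec l).1).1

theorem count_le_pvMx (l : List String) (k : String) : (l.count k : Int) ≤ pvMx l := by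
  by_cases hk : k ∈ l
  · exact ((pvMx_spec l).1).2 k hk
  · rw [List.count_eq_zero_of_not_mem hk]; exact_mod_cast pvMx_nonneg l

theorem pvMx_le_of_perm {l l' : List String} (h : l.Perm l') : pvMx l ≤ pvMx l' := by
  rcases (pvMx_spec l).2 with h0 | ⟨k, _, hv⟩
  · rw [h0]; exact pvMx_nonneg l'
  · rw [hv, h.count_eq]; exact count_le_pvMx l' k

theorem pvMx_perm {l l' : List String} (h : l.Perm l') : pvMx l = pvMx l' :=
  le_antisymm (pvMx_le_of_perm h) (pvMx_le_of_perm h.symm)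

theorem pvMx_append (l : List String) (w : String) :
    pvMx (l ++ [w]) = max (pvMx l) ((l.count w : Int) + 1) := by
  apply le_antisymm
  · rcases ((pvMx_spec (l ++ [w])).2) with h | ⟨k, _, hv⟩
    · rw [h]; exact le_max_of_le_left (pvMx_nonneg l)
    · rw [hv]
      by_cases hkw : k = w
      · subst hkw
        simp only [List.count_append, List.count_singleton]
        push_cast
        exact le_max_of_le_right (by omega)
      · have hkw' : w ≠ k := Ne.symm hkw
        have : (l ++ [w]).count k = l.count k := by
          simp [List.count_append, hkw']
        rw [this]
        exact le_max_of_le_left (count_le_pvMx l k)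
  · apply max_le
    · rcases ((pvMx_spec l).2) with h | ⟨k, _, hv⟩
      · rw [h]; exact pvMx_nonneg _
      · rw [hv]
        calc (l.count k : Int) ≤ ((l ++ [w]).count k : Int) := by
              push_cast [List.count_append]; omega
          _ ≤ pvMx (l ++ [w]) := count_le_pvMx _ _
    · have : (l.count w : Int) + 1 = ((l ++ [w]).count w : Int) := by
        simp [List.count_append]
      rw [this]
      exact count_le_pvMx _ _

-- A's first loop builds exactly Counter(words)
theorem countingA_dict (ws : List String) :
    ws.foldl
      (fun (d : PySem.Dict String Int) word =>
        let d1 := if d.contains word then d else d.insert word 0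
        d1.insert word (d1.getD word 0 + 1))
      PySem.Dict.empty = PySem.Dict.counter ws := by
  rw [← PySem.Dict.foldl_insert_getD_add_one_eq_counter]
  apply PySem.List.foldl_congr_mem
  intro d w _
  by_cases hc : d.contains w
  · simp [hc]
  · simp only [hc, Bool.false_eq_true, if_false]
    rw [PySem.Dict.getD_insert_self, PySem.Dict.insert_insert_self,
        PySem.Dict.getD_of_not_contains _ _ (by simpa using hc)]

-- A's second loop over Counter(ws) computes pvMx ws
theorem countingA_max (ws : List String) :
    (PySem.Dict.counter ws).keys.foldl
      (fun most_freq k =>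
        let v := ((PySem.Dict.counter ws).get? k).getD 0
        if most_freq < v then v else most_freq)
      0 = pvMx ws := by
  rw [PySem.Dict.keys_counter]
  unfold pvMx
  apply PySem.List.foldl_congr_mem
  intro m k _
  rw [← PySem.Dict.getD_eq_get?_getD, PySem.Dict.getD_counter]
  simp only [max_def]
  split_ifs <;> omega

-- in a ≤-sorted list the last element is maximal
theorem pairwise_le_getLast? {l : List String} (h : l.Pairwise (· ≤ ·))
    {x v : String} (hx : x ∈ l) (hv : l.getLast? = some v) : x ≤ v := by
  induction l using List.reverseRecOn with
  | nil => cases hx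
  | append_singleton t a _ =>
    have hva : v = a := by
      rw [List.getLast?_concat] at hv
      exact (Option.some.inj hv).symm
    subst hva
    rcases List.mem_append.1 hx with hxt | hxa
    · exact ((List.pairwise_append.1 h).2.2 x hxt v (List.mem_singleton_self v))
    · rw [List.mem_singleton.1 hxa]

-- B's scan invariant over a sorted list: state = (pvMx p, count of the last word, last word)
theorem countingB_inv (p : List String) (h : p.Pairwise (· ≤ ·)) :
    p.foldl
      (fun (s : Int × Int × Option String) w =>
        let run := if some w = s.2.2 then s.2.1 + 1 else 1
        (if run > s.1 then run else s.1, run, some w))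
      (0, 0, none)
    = (pvMx p,
       (match p.getLast? with | none => 0 | some v => (p.count v : Int)),
       p.getLast?) := by
  induction p using List.reverseRecOn with
  | nil => rfl
  | append_singleton l w ih =>
    have hl : l.Pairwise (· ≤ ·) := (List.pairwise_append.1 h).1
    rw [List.foldl_append, ih hl, List.foldl_cons, List.foldl_nil]
    have hcount : ((l ++ [w]).count w : Int) = (l.count w : Int) + 1 := by
      simp [List.count_append]
    have hrun : (if some w = l.getLast? then
          (match l.getLast? with | none => 0 | some v => (l.count v : Int)) + 1
        else 1) = (l.count w : Int) + 1 := by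
      cases hg : l.getLast? with
      | none =>
        have : l = [] := List.getLast?_eq_none_iff.1 hg
        subst this; simp
      | some v =>
        by_cases hvw : w = v
        · subst hvw; simp
        · have hne : some w ≠ some v := by simpa using hvw
          simp only [hg, hne, if_false]
          -- w ∉ l: w ≤ v (last is maximal) and v ≤ w (all of l ≤ w), so w = v, contradiction
          have hwl : w ∉ l := by
            intro hwl
            have h1 : w ≤ v := pairwise_le_getLast? hl hwl hg
            have h2 : v ≤ w :=
              (List.pairwise_append.1 h).2.2 v (List.mem_of_getLast? hg) w
                (List.mem_singleton_self w)
            exact hvw (le_antisymm h1 h2)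
          rw [List.count_eq_zero_of_not_mem hwl]
          simp
    simp only [hrun, List.getLast?_concat, hcount, Prod.mk.injEq, and_true]
    rw [pvMx_append]
    have := count_le_pvMx l w
    simp only [max_def, gt_iff_lt]
    split_ifs <;> omega

-- ===== VERDICT (by name: the statement is the Claim_ definition above) =====
theorem counting_words_spec : Claim_equal_counting_words := by
  intro paragraph _
  unfold Spec_counting_words counting_words counting_words_alt
  rw [countingA_dict, countingA_max]
  simp only [countingB_inv _ (PySem.List.sorted_pairwise (PySem.Str.split₀ paragraph) (fun w => w))]
  exact (pvMx_perm (PySem.List.sorted_perm (PySem.Str.split₀ paragraph) (fun w => w) false)).symm
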